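-- pv_equiv track=rewrite | github.com/MasterDevopper/SpellVision | python/video_adapters/base.py | choose_from_choices
-- ===== SOURCE A (Python) =====
-- from typing import Any, Iterable, Sequence
--
-- AUTO_TOKENS = {"", "auto", "automatic", "default", "family_default", "adapter_default"}
--
-- def normalize_choice(value: Any) -> str:
--     text = str(value or "").strip()
--     if text.lower() in AUTO_TOKENS:
--         return ""
--     return text
--
-- def choose_from_choices(
--     choices: Sequence[str],
--     requested: Any,
--     preferred_defaults: Iterable[str] = (),
-- ) -> tuple[str, bool]:
--     by_lower = {str(choice).strip().lower(): str(choice).strip() for choice in choices if str(choice).strip()}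
--
--     requested_text = normalize_choice(requested)
--     if requested_text:
--         found = by_lower.get(requested_text.lower())
--         if found:
--             return found, False
--
--     for default in preferred_defaults:
--         default_text = normalize_choice(default)
--         if not default_text:
--             continue
--         found = by_lower.get(default_text.lower())
--         if found:
--             return found, requested_text.lower() != found.lower()
--
--     if choices:
--         first = str(choices[0]).strip()
--         return first, requested_text.lower() != first.lower()
--
--     return requested_text, False
-- ===== SOURCE B (Python) =====
-- AUTO_TOKENS = {"", "auto", "automatic", "default", "family_default", "adapter_default"}
--
-- def normalize_choice(value):
--     text = str(value or "").strip()
--     if text.lower() in AUTO_TOKENS: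
--         return ""
--     return text
--
-- def choose_from_choices(choices, requested, preferred_defaults=()):
--     # Inverted algorithm: instead of indexing the choices in a dict and probing
--     # candidates against it, index the candidates by priority rank and make a
--     # single scan over the choices keeping the best-ranked match.
--     requested_text = normalize_choice(requested)
--     rank = {}
--     if requested_text:
--         rank[requested_text.lower()] = 0
--     nxt = 1
--     for d in preferred_defaults:
--         dt = normalize_choice(d)
--         if dt:
--             key = dt.lower()
--             if key not in rank:
--                 rank[key] = nxt
--         nxt += 1
--     best = None
--     for choice in choices:
--         c = str(choice).strip()
--         if not c:
--             continue
--         r = rank.get(c.lower())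
--         if r is not None and (best is None or r <= best[0]):
--             # <= keeps the later choice on equal rank (dict-overwrite semantics)
--             best = (r, c)
--     if best is not None:
--         found = best[1]
--         return found, requested_text.lower() != found.lower()
--     if choices:
--         first = str(choices[0]).strip()
--         return first, requested_text.lower() != first.lower()
--     return requested_text, False
-- ===== Notes on version B (the rewrite author's own statement) =====
-- stated objective: alternative
-- what changed: B inverts A's data flow: instead of building a lowercase dict of the choices and probing requested-then-defaults against it, B builds a priority-rank map of the candidates (requested rank 0, defaults ranked in order) and makes one scan over the choices keeping the best-ranked match (later choice wins ties, reproducing dict overwrite); the fallback is unchanged.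
import Mathlib
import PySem

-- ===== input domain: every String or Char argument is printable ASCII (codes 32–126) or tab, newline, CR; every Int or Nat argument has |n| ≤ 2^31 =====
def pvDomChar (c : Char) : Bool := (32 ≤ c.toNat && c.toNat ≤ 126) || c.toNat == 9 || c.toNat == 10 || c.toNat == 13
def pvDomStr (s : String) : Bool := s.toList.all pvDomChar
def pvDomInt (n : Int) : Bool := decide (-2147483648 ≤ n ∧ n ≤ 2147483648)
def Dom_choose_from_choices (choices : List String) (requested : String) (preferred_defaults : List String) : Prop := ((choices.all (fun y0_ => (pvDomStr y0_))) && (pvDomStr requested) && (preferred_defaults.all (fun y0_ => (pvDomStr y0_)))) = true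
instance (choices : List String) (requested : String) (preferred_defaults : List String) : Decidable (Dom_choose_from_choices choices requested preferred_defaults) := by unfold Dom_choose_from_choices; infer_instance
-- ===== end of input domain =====

-- B inverts A's data flow: it ranks the candidates by priority and scans the choices once
-- for the best-ranked match, instead of indexing the choices and probing the candidates
-- (objective: alternative); return values are proved identical.

-- ===== PORT A =====
def pvAutoTokens : List String := ["", "auto", "automatic", "default", "family_default", "adapter_default"]

-- str(value or "").strip() = value.strip() for a str argument (value = "" gives "" either way)
def normalize_choice (value : String) : String :=
  let text := PySem.Str.strip value
  if pvAutoTokens.contains (PySem.Str.lower text) then "" else text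

-- one step of A's dict comprehension over choices
def pvByLowerStep (d : PySem.Dict String String) (c : String) : PySem.Dict String String :=
  let t := PySem.Str.strip c
  if t = "" then d else d.insert (PySem.Str.lower t) t

-- the 'for default in preferred_defaults' loop plus the trailing fallback of A
def chooseA_defaults (by_lower : PySem.Dict String String) (rt : String)
    (defaults : List String) (choices : List String) : String × Bool :=
  match defaults with
  | [] =>
    match choices with
    | [] => (rt, false)
    | c0 :: _ =>
      let first := PySem.Str.strip c0
      (first, PySem.Str.lower rt != PySem.Str.lower first)
  | d :: rest =>
    let dt := normalize_choice d
    if dt = "" then chooseA_defaults by_lower rt rest choices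
    else
      match by_lower.get? (PySem.Str.lower dt) with
      | some f =>
        if f = "" then chooseA_defaults by_lower rt rest choices
        else (f, PySem.Str.lower rt != PySem.Str.lower f)
      | none => chooseA_defaults by_lower rt rest choices

def choose_from_choices (choices : List String) (requested : String) (preferred_defaults : List String) : String × Bool :=
  let by_lower := choices.foldl pvByLowerStep PySem.Dict.empty
  let rt := normalize_choice requested
  if rt ≠ "" then
    match by_lower.get? (PySem.Str.lower rt) with
    | some f =>
      if f ≠ "" then (f, false)
      else chooseA_defaults by_lower rt preferred_defaults choices
    | none => chooseA_defaults by_lower rt preferred_defaults choices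
  else chooseA_defaults by_lower rt preferred_defaults choices

-- ===== PORT B =====
-- one step of B's rank-building loop over preferred_defaults (state: rank dict, next rank)
def pvRankStep (st : PySem.Dict String Nat × Nat) (d : String) : PySem.Dict String Nat × Nat :=
  let dt := normalize_choice d
  let R :=
    if dt ≠ "" then
      (if (st.1.get? (PySem.Str.lower dt)).isNone then st.1.insert (PySem.Str.lower dt) st.2 else st.1)
    else st.1
  (R, st.2 + 1)

-- one step of B's single scan over choices keeping the best-ranked match
def pvBestStep (rank : PySem.Dict String Nat) (b : Option (Nat × String)) (choice : String) : Option (Nat × String) :=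
  let c := PySem.Str.strip choice
  if c = "" then b
  else
    match rank.get? (PySem.Str.lower c) with
    | none => b
    | some r =>
      match b with
      | none => some (r, c)
      | some (r0, _) => if r ≤ r0 then some (r, c) else b

def choose_from_choices_alt (choices : List String) (requested : String) (preferred_defaults : List String) : String × Bool :=
  let requested_text := normalize_choice requested
  let rank0 : PySem.Dict String Nat :=
    if requested_text ≠ "" then (PySem.Dict.empty).insert (PySem.Str.lower requested_text) 0
    else PySem.Dict.empty
  let rank := (preferred_defaults.foldl pvRankStep (rank0, 1)).1
  let best := choices.foldl (pvBestStep rank) none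
  match best with
  | some (_, found) => (found, PySem.Str.lower requested_text != PySem.Str.lower found)
  | none =>
    match choices with
    | [] => (requested_text, false)
    | c0 :: _ =>
      let first := PySem.Str.strip c0
      (first, PySem.Str.lower requested_text != PySem.Str.lower first)

-- ===== PRECONDITION & SPEC =====
def Spec_choose_from_choices (choices : List String) (requested : String) (preferred_defaults : List String) (out : String × Bool) : Prop := out = choose_from_choices_alt choices requested preferred_defaults
instance (choices : List String) (requested : String) (preferred_defaults : List String) (out : String × Bool) : Decidable (Spec_choose_from_choices choices requested preferred_defaults out) := by unfold Spec_choose_from_choices; infer_instance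

-- ===== CLAIM (what is proved, stated in full; the proofs are below) =====
def Claim_equal_choose_from_choices : Prop := ∀ (choices : List String) (requested : String) (preferred_defaults : List String), Dom_choose_from_choices choices requested preferred_defaults → Spec_choose_from_choices choices requested preferred_defaults (choose_from_choices choices requested preferred_defaults)

-- ===== LEMMAS AND PROOFS =====

-- A's candidate selection: the first non-empty candidate whose lowercase is a key of by_lower
def pvAsel (D : PySem.Dict String String) (cands : List String) : Option String :=
  cands.findSome? (fun c => if c = "" then none else D.get? (PySem.Str.lower c))

-- invariant of A's lowercase dictionary: every stored value is non-empty and lowercases to its key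
def DictInv (d : PySem.Dict String String) : Prop :=
  ∀ k f, d.get? k = some f → f ≠ "" ∧ PySem.Str.lower f = k

theorem dictInv_empty : DictInv (PySem.Dict.empty) := by
  intro k f h
  simp [PySem.Dict.get?_empty] at h

theorem dictInv_foldl (l : List String) (d : PySem.Dict String String) (hd : DictInv d) :
    DictInv (l.foldl pvByLowerStep d) := by
  induction l generalizing d with
  | nil => exact hd
  | cons c rest ih =>
    by_cases hc : PySem.Str.strip c = ""
    · simpa [List.foldl_cons, pvByLowerStep, hc] using ih d hd
    · have hstep : List.foldl pvByLowerStep d (c :: rest) =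
        List.foldl pvByLowerStep
          (d.insert (PySem.Str.lower (PySem.Str.strip c)) (PySem.Str.strip c)) rest := by
        simp [pvByLowerStep, hc]
      rw [hstep]
      apply ih
      intro k f h
      rw [PySem.Dict.get?_insert] at h
      split_ifs at h with hk
      · cases h
        exact ⟨hc, hk.symm⟩
      · exact hd k f h

-- A's default loop equals findSome? over the normalized candidates, given the invariant
theorem loop_eq (d : PySem.Dict String String) (hinv : DictInv d) (rt : String)
    (ds : List String) (choices : List String) :
    chooseA_defaults d rt ds choices =
      match pvAsel d (ds.map normalize_choice) with
      | some hit => (hit, PySem.Str.lower rt != PySem.Str.lower hit)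
      | none =>
        match choices with
        | [] => (rt, false)
        | c0 :: _ =>
          let first := PySem.Str.strip c0
          (first, PySem.Str.lower rt != PySem.Str.lower first) := by
  induction ds with
  | nil => cases choices <;> simp [chooseA_defaults, pvAsel]
  | cons x rest ih =>
    simp only [pvAsel, List.map_cons, List.findSome?_cons] at *
    by_cases hx : normalize_choice x = ""
    · simp [chooseA_defaults, hx, ih]
    · simp only [chooseA_defaults, if_neg hx]
      cases hg : d.get? (PySem.Str.lower (normalize_choice x)) with
      | none => simp [ih]
      | some f =>
        have hf := (hinv _ _ hg).1
        simp [if_neg hf]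

-- A as a selection over the candidate list (requested first, then the normalized defaults)
theorem A_sel (choices : List String) (requested : String) (preferred_defaults : List String) :
    choose_from_choices choices requested preferred_defaults =
      (let D := choices.foldl pvByLowerStep PySem.Dict.empty
       let rt := normalize_choice requested
       match pvAsel D (rt :: preferred_defaults.map normalize_choice) with
       | some hit => (hit, PySem.Str.lower rt != PySem.Str.lower hit)
       | none =>
         match choices with
         | [] => (rt, false)
         | c0 :: _ =>
           let first := PySem.Str.strip c0
           (first, PySem.Str.lower rt != PySem.Str.lower first)) := by
  have hinv := dictInv_foldl choices PySem.Dict.empty dictInv_empty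
  unfold choose_from_choices
  simp only []
  rw [loop_eq _ hinv]
  by_cases h0 : normalize_choice requested = ""
  · simp [pvAsel, h0]
  · simp only [pvAsel, List.findSome?_cons, if_neg h0]
    cases hg : (choices.foldl pvByLowerStep PySem.Dict.empty).get?
        (PySem.Str.lower (normalize_choice requested)) with
    | none => simp [h0]
    | some f =>
      obtain ⟨hf, hlow⟩ := hinv _ _ hg
      simp [h0, hf, hlow]

-- characterization of B's rank dict against the candidate list, up to bound n
def CandsOk (cands : List String) (R : PySem.Dict String Nat) (n : Nat) : Prop :=
  (∀ k r, R.get? k = some r → r < n ∧ cands.getD r "" ≠ "" ∧ PySem.Str.lower (cands.getD r "") = k) ∧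
  (∀ i, i < n → cands.getD i "" ≠ "" → ∃ r, r ≤ i ∧ R.get? (PySem.Str.lower (cands.getD i "")) = some r)

theorem rankStep_empty (R : PySem.Dict String Nat) (n : Nat) (d : String)
    (hdt : normalize_choice d = "") : pvRankStep (R, n) d = (R, n + 1) := by
  simp [pvRankStep, hdt]

theorem rankStep_pres (R : PySem.Dict String Nat) (n : Nat) (d : String)
    (hdt : normalize_choice d ≠ "")
    (h : (R.get? (PySem.Str.lower (normalize_choice d))).isNone = false) :
    pvRankStep (R, n) d = (R, n + 1) := by
  simp [pvRankStep, hdt, h]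

theorem rankStep_new (R : PySem.Dict String Nat) (n : Nat) (d : String)
    (hdt : normalize_choice d ≠ "")
    (h : (R.get? (PySem.Str.lower (normalize_choice d))).isNone = true) :
    pvRankStep (R, n) d = (R.insert (PySem.Str.lower (normalize_choice d)) n, n + 1) := by
  simp [pvRankStep, hdt, h]

theorem candsOk_succ_of_unchanged (cands : List String) (R : PySem.Dict String Nat) (n : Nat)
    (h : CandsOk cands R n)
    (hn : cands.getD n "" ≠ "" → ∃ r, r ≤ n ∧ R.get? (PySem.Str.lower (cands.getD n "")) = some r) :
    CandsOk cands R (n + 1) := by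
  obtain ⟨h1, h2⟩ := h
  refine ⟨fun k r hkr => ?_, fun i hi hne => ?_⟩
  · obtain ⟨ha, hb, hc⟩ := h1 k r hkr; exact ⟨Nat.lt_succ_of_lt ha, hb, hc⟩
  · rcases Nat.lt_succ_iff_lt_or_eq.mp hi with hlt | rfl
    · exact h2 i hlt hne
    · exact hn hne

theorem rank_fold (cands : List String) (ds : List String) :
    ∀ (R : PySem.Dict String Nat) (n : Nat), CandsOk cands R n →
      cands.drop n = ds.map normalize_choice →
      CandsOk cands (ds.foldl pvRankStep (R, n)).1 (n + ds.length) := by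
  induction ds with
  | nil => intro R n h _; simpa using h
  | cons d rest ih =>
    intro R n h hdrop
    have hcn : cands.getD n "" = normalize_choice d := by
      have hsome : cands[n]? = some (normalize_choice d) := by
        have h0 : (cands.drop n)[0]? = some (normalize_choice d) := by
          rw [hdrop]; simp
        rw [List.getElem?_drop] at h0
        simpa using h0
      simp [List.getD, hsome]
    have hdrop' : cands.drop (n + 1) = rest.map normalize_choice := by
      have hdd : cands.drop (n + 1) = (cands.drop n).drop 1 := by
        rw [List.drop_drop]
      rw [hdd, hdrop]; simp
    have hlen : n + (rest.length + 1) = (n + 1) + rest.length := by omega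
    by_cases hdt : normalize_choice d = ""
    · have hok : CandsOk cands R (n + 1) := by
        apply candsOk_succ_of_unchanged cands R n h
        intro hne; rw [hcn] at hne; exact absurd hdt hne
      have := ih R (n + 1) hok hdrop'
      simpa [rankStep_empty R n d hdt, hlen] using this
    · cases hpres : (R.get? (PySem.Str.lower (normalize_choice d))).isNone with
      | false =>
        have hok : CandsOk cands R (n + 1) := by
          apply candsOk_succ_of_unchanged cands R n h
          intro hne
          rw [hcn]
          cases hg : R.get? (PySem.Str.lower (normalize_choice d)) with
          | none => rw [hg] at hpres; simp at hpres
          | some r => exact ⟨r, Nat.le_of_lt (h.1 _ _ hg).1, rfl⟩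
        have := ih R (n + 1) hok hdrop'
        simpa [rankStep_pres R n d hdt hpres, hlen] using this
      | true =>
        have hnone : R.get? (PySem.Str.lower (normalize_choice d)) = none :=
          Option.isNone_iff_eq_none.mp hpres
        have hok : CandsOk cands (R.insert (PySem.Str.lower (normalize_choice d)) n) (n + 1) := by
          obtain ⟨h1, h2⟩ := h
          refine ⟨fun k r hkr => ?_, fun i hi hne => ?_⟩
          · rw [PySem.Dict.get?_insert] at hkr
            split_ifs at hkr with hk
            · cases hkr
              refine ⟨Nat.lt_succ_self _, ?_, ?_⟩ <;> rw [hcn]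
              · exact hdt
              · exact hk.symm
            · obtain ⟨ha, hb, hc⟩ := h1 k r hkr; exact ⟨Nat.lt_succ_of_lt ha, hb, hc⟩
          · rcases Nat.lt_succ_iff_lt_or_eq.mp hi with hlt | rfl
            · obtain ⟨r, hr, hget⟩ := h2 i hlt hne
              refine ⟨r, hr, ?_⟩
              rw [PySem.Dict.get?_insert]
              split_ifs with hk
              · rw [hk, hnone] at hget; cases hget
              · exact hget
            · rw [hcn]
              exact ⟨_, le_refl _, by rw [PySem.Dict.get?_insert]; simp⟩
        have := ih _ (n + 1) hok hdrop'
        simpa [rankStep_new R n d hdt hpres, hlen] using this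

-- relation between A's growing dict and B's best-ranked accumulator along the same scan
def BInv (R : PySem.Dict String Nat) (d : PySem.Dict String String)
    (b : Option (Nat × String)) : Prop :=
  match b with
  | none => ∀ k v, d.get? k = some v → R.get? k = none
  | some (r, t) =>
      R.get? (PySem.Str.lower t) = some r ∧ d.get? (PySem.Str.lower t) = some t ∧
      ∀ k v r', d.get? k = some v → R.get? k = some r' → r ≤ r'

theorem binv_fold (R : PySem.Dict String Nat) (cs : List String) :
    ∀ (d : PySem.Dict String String) (b : Option (Nat × String)), BInv R d b →
      BInv R (cs.foldl pvByLowerStep d) (cs.foldl (pvBestStep R) b) := by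
  induction cs with
  | nil => intro d b h; exact h
  | cons c rest ih =>
    intro d b h
    simp only [List.foldl_cons]
    apply ih
    unfold pvByLowerStep pvBestStep
    by_cases hc : PySem.Str.strip c = ""
    · simpa [hc] using h
    · simp only [if_neg hc]
      cases hg : R.get? (PySem.Str.lower (PySem.Str.strip c)) with
      | none =>
        cases b with
        | none =>
          intro k v hkv
          rw [PySem.Dict.get?_insert] at hkv
          split_ifs at hkv with hk
          · rw [hk]; exact hg
          · exact h k v hkv
        | some p =>
          obtain ⟨r, t⟩ := p
          obtain ⟨hR, hD, hmin⟩ := h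
          have hne : PySem.Str.lower t ≠ PySem.Str.lower (PySem.Str.strip c) := by
            intro he; rw [he, hg] at hR; cases hR
          refine ⟨hR, ?_, ?_⟩
          · rw [PySem.Dict.get?_insert, if_neg hne]; exact hD
          · intro k v r' hkv hkr
            rw [PySem.Dict.get?_insert] at hkv
            split_ifs at hkv with hk
            · rw [hk, hg] at hkr; cases hkr
            · exact hmin k v r' hkv hkr
      | some r =>
        cases b with
        | none =>
          refine ⟨hg, by rw [PySem.Dict.get?_insert]; simp, ?_⟩
          intro k v r' hkv hkr
          rw [PySem.Dict.get?_insert] at hkv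
          split_ifs at hkv with hk
          · rw [hk, hg] at hkr; cases hkr; exact le_refl r
          · rw [h k v hkv] at hkr; cases hkr
        | some p =>
          obtain ⟨r0, t0⟩ := p
          obtain ⟨hR, hD, hmin⟩ := h
          by_cases hle : r ≤ r0
          · simp only [if_pos hle]
            refine ⟨hg, by rw [PySem.Dict.get?_insert]; simp, ?_⟩
            intro k v r' hkv hkr
            rw [PySem.Dict.get?_insert] at hkv
            split_ifs at hkv with hk
            · rw [hk, hg] at hkr; cases hkr; exact le_refl r
            · exact le_trans hle (hmin k v r' hkv hkr)
          · simp only [if_neg hle]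
            have hne : PySem.Str.lower t0 ≠ PySem.Str.lower (PySem.Str.strip c) := by
              intro he
              rw [he, hg] at hR; cases hR
              exact hle (le_refl r)
            refine ⟨hR, ?_, ?_⟩
            · rw [PySem.Dict.get?_insert, if_neg hne]; exact hD
            · intro k v r' hkv hkr
              rw [PySem.Dict.get?_insert] at hkv
              split_ifs at hkv with hk
              · rw [hk, hg] at hkr; cases hkr; omega
              · exact hmin k v r' hkv hkr
    
-- findSome? returns the value at the first index where f hits
theorem findSome?_at {α β : Type} (f : α → Option β) (t : β) :
    ∀ (l : List α) (r : Nat) (hr : r < l.length),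
      (∀ i (hi : i < l.length), i < r → f l[i] = none) → f l[r] = some t →
      l.findSome? f = some t := by
  intro l
  induction l with
  | nil => intro r hr; simp at hr
  | cons x xs ih =>
    intro r hr hnone hhit
    cases r with
    | zero =>
      have hx : f x = some t := by simpa using hhit
      simp [hx]
    | succ r' =>
      have hx : f x = none := hnone 0 (by simp) (Nat.succ_pos r')
      rw [List.findSome?_cons, hx]
      exact ih r' (by simpa using hr)
        (fun i hi hlt => hnone (i + 1) (by simpa using hi) (by omega)) hhit

-- main bridge: from the two invariants, B's best match reproduces A's selection
theorem best_eq_sel (cands : List String) (R : PySem.Dict String Nat)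
    (D : PySem.Dict String String) (b : Option (Nat × String))
    (hC : CandsOk cands R cands.length) (hB : BInv R D b) :
    pvAsel D cands = b.map (·.2) := by
  cases b with
  | none =>
    have hnone : ∀ c ∈ cands, (if c = "" then none else D.get? (PySem.Str.lower c)) = none := by
      intro c hcmem
      by_cases hce : c = ""
      · simp [hce]
      · simp only [if_neg hce]
        cases hg : D.get? (PySem.Str.lower c) with
        | none => rfl
        | some v =>
          exfalso
          obtain ⟨i, hi, rfl⟩ := List.mem_iff_getElem.mp hcmem
          have hgd : cands.getD i "" = cands[i] := List.getD_eq_getElem cands "" hi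
          obtain ⟨r, _, hget⟩ := hC.2 i hi (by rw [hgd]; exact hce)
          rw [hgd] at hget
          rw [hB _ _ hg] at hget
          cases hget
    simp only [pvAsel, Option.map_none]
    exact List.findSome?_eq_none_iff.mpr hnone
  | some p =>
    obtain ⟨r, t⟩ := p
    obtain ⟨hR, hD, hmin⟩ := hB
    obtain ⟨hrlt, hrne, hrlow⟩ := hC.1 _ _ hR
    have hrlen : r < cands.length := by
      by_contra hge
      rw [List.getD_eq_default cands "" (Nat.le_of_not_lt hge)] at hrne
      exact hrne rfl
    have hgdr : cands.getD r "" = cands[r] := List.getD_eq_getElem cands "" hrlen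
    rw [hgdr] at hrne hrlow
    simp only [pvAsel, Option.map_some]
    apply findSome?_at _ t cands r hrlen
    · intro i hi hlt
      by_cases hce : cands[i] = ""
      · simp [hce]
      · simp only [if_neg hce]
        cases hg : D.get? (PySem.Str.lower cands[i]) with
        | none => rfl
        | some v =>
          exfalso
          have hgd : cands.getD i "" = cands[i] := List.getD_eq_getElem cands "" hi
          obtain ⟨r', hr'le, hget⟩ := hC.2 i hi (by rw [hgd]; exact hce)
          rw [hgd] at hget
          have := hmin _ _ _ hg hget
          omega
    · rw [if_neg hrne, hrlow, hD]

-- ===== VERDICT (by name: the statement is the Claim_ definition above) =====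
set_option maxHeartbeats 2000000 in
theorem choose_from_choices_spec : Claim_equal_choose_from_choices := by
  intro choices requested preferred_defaults _
  unfold Spec_choose_from_choices
  rw [A_sel]
  unfold choose_from_choices_alt
  simp only []
  set rt := normalize_choice requested with hrt
  set cands := rt :: preferred_defaults.map normalize_choice with hcands
  set rank0 : PySem.Dict String Nat :=
    (if rt ≠ "" then (PySem.Dict.empty).insert (PySem.Str.lower rt) 0 else PySem.Dict.empty) with hrank0
  set rank := (preferred_defaults.foldl pvRankStep (rank0, 1)).1 with hrank
  have hC0 : CandsOk cands rank0 1 := by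
    constructor
    · intro k r hkr
      rw [hrank0] at hkr
      split_ifs at hkr with h0
      · rw [PySem.Dict.get?_insert] at hkr
        split_ifs at hkr with hk
        · cases hkr
          exact ⟨Nat.one_pos, by simpa [hcands] using h0, by simp [hcands, hk]⟩
        · simp [PySem.Dict.get?_empty] at hkr
      · simp [PySem.Dict.get?_empty] at hkr
    · intro i hi hne
      interval_cases i
      have h0 : rt ≠ "" := by simpa [hcands] using hne
      refine ⟨0, le_refl 0, ?_⟩
      rw [hrank0, if_pos h0, PySem.Dict.get?_insert]
      simp [hcands]
  have hdrop : cands.drop 1 = preferred_defaults.map normalize_choice := by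
    simp [hcands]
  have hCf : CandsOk cands rank cands.length := by
    have := rank_fold cands preferred_defaults rank0 1 hC0 hdrop
    have hlen : cands.length = 1 + preferred_defaults.length := by
      simp [hcands, Nat.add_comm]
    rw [hlen]
    exact this
  have hB : BInv rank (choices.foldl pvByLowerStep PySem.Dict.empty)
      (choices.foldl (pvBestStep rank) none) := by
    apply binv_fold
    intro k v hkv
    simp [PySem.Dict.get?_empty] at hkv
  have hsel := best_eq_sel cands rank (choices.foldl pvByLowerStep PySem.Dict.empty)
      (choices.foldl (pvBestStep rank) none) hCf hB
  rw [hsel]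
  cases hb : choices.foldl (pvBestStep rank) none with
  | none => rfl
  | some p => obtain ⟨r, t⟩ := p; rfl
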